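-- pv_equiv track=rewrite | github.com/ysenoh/programing | codeiq/3525/solve.py | getPrimesAndDivs
-- ===== SOURCE A (Python) =====
-- def getPrimesAndDivs(n):
--     primes = []
--     divs = [1]
--     p = 2
--
--     while n >= p**2:
--         c = 0
--         while n%p == 0:
--             c += 1
--             n //= p
--
--         if c > 0:
--             primes.append(p)
--             addDivsTo(divs, p, c)
--
--         p += 2 if p>2 else 1
--
--     if n > 1:
--         primes.append(n)
--         addDivsTo(divs, n, 1)
--
--     return primes, divs
--
-- def addDivsTo(divs, p, c):
--     curDivs = divs[:]
--     p2 = 1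
--
--     for i in range(1, c+1):
--         p2 *= p
--         divs.extend(
--             map(lambda x: x*p2, curDivs))
-- ===== SOURCE B (Python) =====
-- def getPrimesAndDivs(n):
--     # Recursive decomposition: peel off the smallest prime factor (found by a
--     # fresh scan from 2), recurse on the co-factor, then merge the sub-result's
--     # divisors with the powers of that prime.
--     d = 2
--     while d * d <= n and n % d != 0:
--         d += 1
--     if d * d <= n:
--         c, m = 0, n
--         while m % d == 0:
--             c += 1
--             m //= d
--         primes, divs = getPrimesAndDivs(m)
--         powers = [d ** e for e in range(c + 1)]
--         return [d] + primes, [q * dv for dv in divs for q in powers]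
--     if n > 1:
--         return [n], [1, n]
--     return [], [1]
-- ===== Notes on version B (the rewrite author's own statement) =====
-- stated objective: alternative
-- what changed: B is recursive where A is iterative: it finds the smallest prime factor by a fresh scan from 2, strips it, recurses on the co-factor, and merges the sub-result's divisor list with the prime's powers by a comprehension, instead of A's single continuing candidate walk with in-place snapshot-extend of the divisor list.
import Mathlib
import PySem

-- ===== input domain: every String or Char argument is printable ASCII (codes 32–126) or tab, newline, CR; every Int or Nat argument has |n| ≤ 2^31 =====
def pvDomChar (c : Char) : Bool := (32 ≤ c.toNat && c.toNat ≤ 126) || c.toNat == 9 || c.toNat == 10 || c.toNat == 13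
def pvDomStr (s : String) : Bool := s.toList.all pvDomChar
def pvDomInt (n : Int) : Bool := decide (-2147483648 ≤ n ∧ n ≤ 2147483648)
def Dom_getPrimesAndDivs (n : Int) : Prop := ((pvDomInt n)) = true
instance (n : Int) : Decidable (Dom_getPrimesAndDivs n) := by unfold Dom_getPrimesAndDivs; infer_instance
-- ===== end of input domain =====

-- B replaces A's iterative candidate walk + in-place divisor extension by a recursion on the
-- smallest prime factor (alternative decomposition, same cost); return values proved equal
-- for every Int input.

-- termination helper cited by the ports' decreasing_by blocks
theorem pvEdivLtSelf (n p : Int) (hn : 0 < n) (hp : 2 ≤ p) : n / p < n := by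
  have h := Int.mul_ediv_add_emod n p
  have h2 := Int.emod_nonneg n (show p ≠ 0 by omega)
  have h3 : 0 ≤ n / p := Int.ediv_nonneg (by omega) (by omega)
  nlinarith

-- ===== PORT A =====

-- inner 'while n%p == 0: c += 1; n //= p' of A; the '2 ≤ p ∧ 0 < n' part of the guard is a
-- totality guard only (every call site has p ≥ 2 and n ≥ p² > 0, and divisibility keeps n > 0).
def innerA (p n : Int) : Int × Int :=
  if h : 2 ≤ p ∧ 0 < n ∧ PySem.Int.mod n p = 0 then
    let r := innerA p (PySem.Int.floordiv n p)
    (r.1 + 1, r.2)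
  else (0, n)
  termination_by n.toNat
  decreasing_by
    rw [PySem.Int.floordiv_eq_ediv_of_pos (by omega)]
    have h1 := pvEdivLtSelf n p h.2.1 h.1
    omega

-- A's addDivsTo: snapshot curDivs, then for i in 1..c: p2 *= p; divs.extend(curDivs·p2)
def addDivsToA (divs : List Int) (p c : Int) : List Int :=
  let curDivs := divs
  ((PySem.List.pyRange 1 (c+1) 1).foldl
    (fun (st : Int × List Int) _i =>
      (st.1 * p, st.2 ++ curDivs.map (fun x => x * (st.1 * p))))
    (1, divs)).2

-- n does not grow through the inner loop (cited by loopA's decreasing_by)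
theorem innerA_snd_le (p n : Int) : (innerA p n).2 ≤ n := by
  fun_induction innerA p n with
  | case1 n h r ih =>
    have hlt : PySem.Int.floordiv n p < n := by
      rw [PySem.Int.floordiv_eq_ediv_of_pos (by omega : (0:Int) < p)]
      exact pvEdivLtSelf n p h.2.1 h.1
    show (innerA p (PySem.Int.floordiv n p)).2 ≤ n
    exact le_trans ih (le_of_lt hlt)
  | case2 n h => exact le_refl n

def loopA (n p : Int) (primes divs : List Int) : List Int × List Int :=
  if hc : p ^ 2 ≤ n then
    -- c = (innerA p n).1 is Python's c; (innerA p n).2 is n after the inner while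
    loopA (innerA p n).2 (p + if 2 < p then 2 else 1)
      (if 0 < (innerA p n).1 then primes ++ [p] else primes)
      (if 0 < (innerA p n).1 then addDivsToA divs p (innerA p n).1 else divs)
  else if 1 < n then (primes ++ [n], addDivsToA divs n 1)
  else (primes, divs)
  termination_by (n + 2 - p).toNat
  decreasing_by
    have hn0 : 0 ≤ n := le_trans (sq_nonneg p) hc
    have h1 : (innerA p n).2 ≤ n := innerA_snd_le p n
    have hplt : p < n + 2 := by
      by_cases hp2 : 2 ≤ p
      · nlinarith [hc]
      · omega
    split <;> omega

def getPrimesAndDivs (n : Int) : List Int × List Int :=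
  loopA n 2 [] [1]

-- ===== PORT B =====

-- B's 'while d*d <= n and n % d != 0: d += 1' scan for the smallest factor; the '2 ≤ d'
-- conjunct is a totality guard only (the entry call starts at 2 and d only increments).
def spfScan (n d : Int) : Int :=
  if h : 2 ≤ d ∧ d ^ 2 ≤ n ∧ PySem.Int.mod n d ≠ 0 then spfScan n (d + 1) else d
  termination_by (n - d).toNat
  decreasing_by
    have hdn : d < n := by nlinarith [h.1, h.2.1]
    omega

-- B's 'while m % d == 0: c += 1; m //= d' (same totality-guard remark as innerA)
def stripAlt (p n : Int) : Int × Int :=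
  if h : 2 ≤ p ∧ 0 < n ∧ PySem.Int.mod n p = 0 then
    let r := stripAlt p (PySem.Int.floordiv n p)
    (r.1 + 1, r.2)
  else (0, n)
  termination_by n.toNat
  decreasing_by
    rw [PySem.Int.floordiv_eq_ediv_of_pos (by omega)]
    have h1 := pvEdivLtSelf n p h.2.1 h.1
    omega

-- the four lemmas below are cited by getPrimesAndDivs_alt's decreasing_by
theorem spfScan_ge (n d : Int) : d ≤ spfScan n d := by
  fun_induction spfScan n d with
  | case1 d h ih => omega
  | case2 d h => exact le_refl d

theorem spfScan_mod (n d : Int) (hd : 2 ≤ d) (hsq : (spfScan n d) ^ 2 ≤ n) :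
    PySem.Int.mod n (spfScan n d) = 0 := by
  fun_induction spfScan n d with
  | case1 d h ih => exact ih (by omega) hsq
  | case2 d h =>
    by_contra hm
    exact h ⟨hd, hsq, hm⟩

theorem stripAlt_pos (p n : Int) (hn : 0 < n) : 0 < (stripAlt p n).2 := by
  fun_induction stripAlt p n with
  | case1 n h r ih =>
    show 0 < (stripAlt p (PySem.Int.floordiv n p)).2
    apply ih
    rw [PySem.Int.floordiv_eq_ediv_of_pos (by omega : (0:Int) < p)]
    have hdvd : p ∣ n := (PySem.Int.mod_eq_zero_iff_dvd n p).mp h.2.2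
    obtain ⟨k, rfl⟩ := hdvd
    rw [Int.mul_ediv_cancel_left _ (by omega : p ≠ 0)]
    nlinarith [h.1, h.2.1]
  | case2 n h => exact hn

theorem stripAlt_lt (p n : Int) (hp : 2 ≤ p) (hn : 0 < n)
    (hm : PySem.Int.mod n p = 0) : (stripAlt p n).2 < n := by
  rw [stripAlt.eq_def, dif_pos ⟨hp, hn, hm⟩]
  have h1 : (stripAlt p (PySem.Int.floordiv n p)).2 ≤ PySem.Int.floordiv n p := by
    have : stripAlt p n = stripAlt p n := rfl
    -- strip never increases its argument; same statement as innerA_snd_le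
    clear this
    generalize PySem.Int.floordiv n p = m
    fun_induction stripAlt p m with
    | case1 m h r ih =>
      have hlt : PySem.Int.floordiv m p < m := by
        rw [PySem.Int.floordiv_eq_ediv_of_pos (by omega : (0:Int) < p)]
        exact pvEdivLtSelf m p h.2.1 h.1
      show (stripAlt p (PySem.Int.floordiv m p)).2 ≤ m
      exact le_trans ih (le_of_lt hlt)
    | case2 m h => exact le_refl m
  have h2 : PySem.Int.floordiv n p < n := by
    rw [PySem.Int.floordiv_eq_ediv_of_pos (by omega : (0:Int) < p)]
    exact pvEdivLtSelf n p hn hp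
  calc (stripAlt p (PySem.Int.floordiv n p)).2 ≤ PySem.Int.floordiv n p := h1
    _ < n := h2

def getPrimesAndDivs_alt (n : Int) : List Int × List Int :=
  if h : (spfScan n 2) ^ 2 ≤ n then
    let d := spfScan n 2
    let c := (stripAlt d n).1
    let m := (stripAlt d n).2
    let pr := getPrimesAndDivs_alt m
    (d :: pr.1,
     pr.2.flatMap (fun dv =>
       ((PySem.List.pyRange 0 (c + 1) 1).map (fun e => d ^ e.toNat)).map (fun q => q * dv)))
  else if 1 < n then ([n], [1, n]) else ([], [1])
  termination_by n.toNat
  decreasing_by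
    have hd2 : 2 ≤ spfScan n 2 := spfScan_ge n 2
    have hn0 : 0 < n := by nlinarith [hd2, h]
    have hm0 : PySem.Int.mod n (spfScan n 2) = 0 := spfScan_mod n 2 (by omega) h
    have h1 := stripAlt_lt (spfScan n 2) n hd2 hn0 hm0
    have h2 := stripAlt_pos (spfScan n 2) n hn0
    omega

-- ===== PRECONDITION & SPEC =====
def Spec_getPrimesAndDivs (n : Int) (out : List Int × List Int) : Prop := out = getPrimesAndDivs_alt n
instance (n : Int) (out : List Int × List Int) : Decidable (Spec_getPrimesAndDivs n out) := by unfold Spec_getPrimesAndDivs; infer_instance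

-- ===== CLAIM (what is proved, stated in full; the proofs are below) =====
def Claim_equal_getPrimesAndDivs : Prop := ∀ (n : Int), Dom_getPrimesAndDivs n → Spec_getPrimesAndDivs n (getPrimesAndDivs n)

-- ===== LEMMAS AND PROOFS =====

theorem stripAlt_eq_innerA (p n : Int) : stripAlt p n = innerA p n := by
  fun_induction stripAlt p n with
  | case1 n h r ih =>
    conv_rhs => rw [innerA.eq_def]
    rw [dif_pos h]
    show ((stripAlt p (PySem.Int.floordiv n p)).1 + 1, (stripAlt p (PySem.Int.floordiv n p)).2)
        = ((innerA p (PySem.Int.floordiv n p)).1 + 1, (innerA p (PySem.Int.floordiv n p)).2)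
    rw [ih]
  | case2 n h =>
    conv_rhs => rw [innerA.eq_def]
    rw [dif_neg h]

theorem innerA_fst_nonneg (p n : Int) : 0 ≤ (innerA p n).1 := by
  fun_induction innerA p n with
  | case1 n h r ih =>
    show 0 ≤ (innerA p (PySem.Int.floordiv n p)).1 + 1
    omega
  | case2 n h => exact le_refl 0

theorem innerA_fst_pos (p n : Int) (hp : 2 ≤ p) (hn : 0 < n)
    (hm : PySem.Int.mod n p = 0) : 0 < (innerA p n).1 := by
  rw [innerA.eq_def, dif_pos ⟨hp, hn, hm⟩]
  have := innerA_fst_nonneg p (PySem.Int.floordiv n p)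
  show 0 < (innerA p (PySem.Int.floordiv n p)).1 + 1
  omega

theorem innerA_dvd (p n : Int) : (innerA p n).2 ∣ n := by
  fun_induction innerA p n with
  | case1 n h r ih =>
    show (innerA p (PySem.Int.floordiv n p)).2 ∣ n
    have hfd : PySem.Int.floordiv n p ∣ n := by
      rw [PySem.Int.floordiv_eq_ediv_of_pos (by omega : (0:Int) < p)]
      obtain ⟨k, rfl⟩ := (PySem.Int.mod_eq_zero_iff_dvd _ p).mp h.2.2
      rw [Int.mul_ediv_cancel_left _ (by omega : p ≠ 0)]
      exact ⟨p, mul_comm p k⟩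
    exact dvd_trans ih hfd
  | case2 n h => exact dvd_rfl

theorem innerA_pos (p n : Int) (hn : 0 < n) : 0 < (innerA p n).2 := by
  rw [← stripAlt_eq_innerA]
  exact stripAlt_pos p n hn

theorem innerA_not_dvd (p n : Int) (hp : 2 ≤ p) : 0 < n → ¬ p ∣ (innerA p n).2 := by
  fun_induction innerA p n with
  | case1 n h r ih =>
    intro _
    show ¬ p ∣ (innerA p (PySem.Int.floordiv n p)).2
    apply ih
    rw [PySem.Int.floordiv_eq_ediv_of_pos (by omega : (0:Int) < p)]
    obtain ⟨k, rfl⟩ := (PySem.Int.mod_eq_zero_iff_dvd _ p).mp h.2.2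
    rw [Int.mul_ediv_cancel_left _ (by omega : p ≠ 0)]
    nlinarith [h.2.1]
  | case2 n h =>
    intro hn hdvd
    exact h ⟨hp, hn, (PySem.Int.mod_eq_zero_iff_dvd n p).mpr hdvd⟩

-- proof-side mirror of A's loop collecting (prime, exponent) pairs
def loopB (n p : Int) (facts : List (Int × Int)) : List (Int × Int) :=
  if hc : p ^ 2 ≤ n then
    loopB (innerA p n).2 (p + if 2 < p then 2 else 1)
      (if 0 < (innerA p n).1 then facts ++ [(p, (innerA p n).1)] else facts)
  else if 1 < n then facts ++ [(n, 1)]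
  else facts
  termination_by (n + 2 - p).toNat
  decreasing_by
    have hn0 : 0 ≤ n := le_trans (sq_nonneg p) hc
    have h1 : (innerA p n).2 ≤ n := innerA_snd_le p n
    have hplt : p < n + 2 := by
      by_cases hp2 : 2 ≤ p
      · nlinarith [hc]
      · omega
    split <;> omega

-- proof-side abstraction of one addDivsTo pass
def buildStep (divs : List Int) (pc : Int × Int) : List Int :=
  let powers := (PySem.List.pyRange 0 (pc.2 + 1) 1).map (fun e => pc.1 ^ e.toNat)
  powers.flatMap (fun q => divs.map (fun d => d * q))

-- A's extend-fold over range(1, c+1), unrolled (generalized over the running (p2, acc) state)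
theorem addDivsToA_fold (p : Int) (cur : List Int) (c : Nat) :
    ∀ (p2 : Int) (acc : List Int),
      ((PySem.List.pyRange 1 ((c : Int) + 1) 1).foldl
        (fun (st : Int × List Int) _i =>
          (st.1 * p, st.2 ++ cur.map (fun x => x * (st.1 * p)))) (p2, acc))
      = (p2 * p ^ c,
         acc ++ (List.range c).flatMap (fun e => cur.map (fun x => x * (p2 * p ^ (e + 1))))) := by
  induction c with
  | zero =>
    intro p2 acc
    rw [PySem.List.pyRange_one_eq_nil (by omega)]
    simp
  | succ k ih =>
    intro p2 acc
    have hsplit : PySem.List.pyRange 1 ((k : Int) + 1 + 1) 1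
        = PySem.List.pyRange 1 ((k : Int) + 1) 1 ++ [(k : Int) + 1] := by
      have := PySem.List.pyRange_one_succ_right (a := 1) (b := (k : Int) + 1) (by omega)
      simpa using this
    have hc : ((k + 1 : Nat) : Int) + 1 = (k : Int) + 1 + 1 := by push_cast; ring
    rw [hc, hsplit, List.foldl_append, ih]
    simp only [List.foldl_cons, List.foldl_nil, List.range_succ, List.flatMap_append,
      List.flatMap_cons, List.flatMap_nil, List.append_nil, List.append_assoc]
    have hcoef : p2 * p ^ k * p = p2 * p ^ (k + 1) := by ring
    rw [hcoef]

theorem buildStep_expand (divs : List Int) (p : Int) (k : Nat) :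
    buildStep divs (p, (k : Int))
      = divs ++ (List.range k).flatMap (fun e => divs.map (fun x => x * (1 * p ^ (e + 1)))) := by
  induction k with
  | zero =>
    show ((PySem.List.pyRange 0 ((0 : Int) + 1) 1).map (fun e => p ^ e.toNat)).flatMap
        (fun q => divs.map (fun d => d * q)) = _
    rw [PySem.List.pyRange_one_singleton]
    simp
  | succ k ih =>
    show ((PySem.List.pyRange 0 (((k + 1 : Nat) : Int) + 1) 1).map (fun e => p ^ e.toNat)).flatMap
        (fun q => divs.map (fun d => d * q)) = _
    have hc : (((k + 1 : Nat) : Int) + 1) = ((k : Int) + 1) + 1 := by push_cast; ring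
    have hsplit : PySem.List.pyRange 0 ((k : Int) + 1 + 1) 1
        = PySem.List.pyRange 0 ((k : Int) + 1) 1 ++ [(k : Int) + 1] := by
      have := PySem.List.pyRange_one_succ_right (a := 0) (b := (k : Int) + 1) (by omega)
      simpa using this
    rw [hc, hsplit, List.map_append, List.flatMap_append]
    have hpre : ((PySem.List.pyRange 0 ((k : Int) + 1) 1).map (fun e => p ^ e.toNat)).flatMap
        (fun q => divs.map (fun d => d * q))
        = divs ++ (List.range k).flatMap (fun e => divs.map (fun x => x * (1 * p ^ (e + 1)))) := ih
    rw [hpre]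
    have htona : ((k : Int) + 1).toNat = k + 1 := by omega
    simp only [List.map_cons, List.map_nil, List.flatMap_cons, List.flatMap_nil,
      List.append_nil, htona, List.range_succ, List.flatMap_append, List.append_assoc]
    simp [one_mul]

theorem addDivsToA_eq_buildStep (divs : List Int) (p c : Int) (hc : 0 ≤ c) :
    addDivsToA divs p c = buildStep divs (p, c) := by
  obtain ⟨k, rfl⟩ : ∃ k : Nat, c = (k : Int) := ⟨c.toNat, (Int.toNat_of_nonneg hc).symm⟩
  show ((PySem.List.pyRange 1 ((k : Int) + 1) 1).foldl
      (fun (st : Int × List Int) _i =>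
        (st.1 * p, st.2 ++ divs.map (fun x => x * (st.1 * p)))) (1, divs)).2
    = buildStep divs (p, (k : Int))
  rw [addDivsToA_fold p divs k 1 divs, buildStep_expand]

-- the factorize loop only appends to its accumulator
theorem loopB_prepend (n p : Int) (gs : List (Int × Int)) :
    ∀ fs : List (Int × Int), loopB n p (fs ++ gs) = fs ++ loopB n p gs := by
  fun_induction loopB n p gs with
  | case1 n p gs hc ih =>
    intro fs
    simp only [dite_eq_ite] at ih
    conv_lhs => rw [loopB.eq_def]
    rw [dif_pos hc]
    by_cases h0 : 0 < (innerA p n).1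
    · rw [if_pos h0, if_pos h0] at *
      rw [List.append_assoc]
      exact ih fs
    · rw [if_neg h0, if_neg h0] at *
      exact ih fs
  | case2 n p gs hc hn =>
    intro fs
    conv_lhs => rw [loopB.eq_def]
    rw [dif_neg hc, if_pos hn, List.append_assoc]
  | case3 n p gs hc hn =>
    intro fs
    conv_lhs => rw [loopB.eq_def]
    rw [dif_neg hc, if_neg hn]

theorem loopB_acc (n p : Int) (fs : List (Int × Int)) :
    loopB n p fs = fs ++ loopB n p [] := by
  have := loopB_prepend n p [] fs
  simpa using this

-- invariant: A's interleaved loop equals factorize-then-fold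
theorem loopA_eq (n p : Int) (primes divs : List Int) :
    loopA n p primes divs
      = (primes ++ (loopB n p []).map (·.1), (loopB n p []).foldl buildStep divs) := by
  fun_induction loopA n p primes divs with
  | case1 n p primes divs hc ih =>
    have hB : loopB n p []
        = (if 0 < (innerA p n).1 then [((p : Int), (innerA p n).1)] else [])
          ++ loopB (innerA p n).2 (p + if 2 < p then 2 else 1) [] := by
      conv_lhs => rw [loopB.eq_def]
      rw [dif_pos hc]
      by_cases h0 : 0 < (innerA p n).1
      · rw [if_pos h0, if_pos h0, loopB_acc]
        simp
      · rw [if_neg h0, if_neg h0]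
        simp
    simp only [dite_eq_ite] at ih
    rw [ih, hB]
    by_cases h0 : 0 < (innerA p n).1
    · simp only [if_pos h0, List.map_cons, List.foldl_cons, List.append_assoc,
        List.cons_append, List.nil_append]
      rw [addDivsToA_eq_buildStep divs p (innerA p n).1 (innerA_fst_nonneg p n)]
    · simp [if_neg h0]
  | case2 n p primes divs hc hn =>
    conv_rhs => rw [loopB.eq_def]
    rw [dif_neg hc, if_pos hn]
    simp only [List.nil_append, List.map_cons, List.map_nil, List.foldl_cons, List.foldl_nil]
    rw [addDivsToA_eq_buildStep divs n 1 (by omega)]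
  | case3 n p primes divs hc hn =>
    conv_rhs => rw [loopB.eq_def]
    rw [dif_neg hc, if_neg hn]
    simp

-- proof-side mirror of B's recursion: its list of (prime, exponent) pairs
def altFacts (n : Int) : List (Int × Int) :=
  if h : (spfScan n 2) ^ 2 ≤ n then
    (spfScan n 2, (stripAlt (spfScan n 2) n).1) :: altFacts (stripAlt (spfScan n 2) n).2
  else if 1 < n then [(n, 1)] else []
  termination_by n.toNat
  decreasing_by
    have hd2 : 2 ≤ spfScan n 2 := spfScan_ge n 2
    have hn0 : 0 < n := by nlinarith [hd2, h]
    have hm0 : PySem.Int.mod n (spfScan n 2) = 0 := spfScan_mod n 2 (by omega) h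
    have h1 := stripAlt_lt (spfScan n 2) n hd2 hn0 hm0
    have h2 := stripAlt_pos (spfScan n 2) n hn0
    omega

-- B's divisor list as a recursion over altFacts
def divsB : List (Int × Int) → List Int
  | [] => [1]
  | (p, c) :: rest =>
      (divsB rest).flatMap (fun dv =>
        ((PySem.List.pyRange 0 (c + 1) 1).map (fun e => p ^ e.toNat)).map (fun q => q * dv))

theorem alt_eq (n : Int) :
    getPrimesAndDivs_alt n = ((altFacts n).map (·.1), divsB (altFacts n)) := by
  fun_induction getPrimesAndDivs_alt n with
  | case1 n h d c m pr ih =>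
    conv_rhs => rw [altFacts.eq_def]
    rw [dif_pos h]
    rw [show pr = ((altFacts m).map (·.1), divsB (altFacts m)) from ih]
    rfl
  | case2 n h hn =>
    conv_rhs => rw [altFacts.eq_def]
    rw [dif_neg h, if_pos hn]
    have hr : PySem.List.pyRange 0 2 = [0, 1] := by decide
    show ((n : Int) :: [], [1, n]) = _
    simp [divsB, hr]
  | case3 n h hn =>
    conv_rhs => rw [altFacts.eq_def]
    rw [dif_neg h, if_neg hn]
    simp [divsB]

theorem foldl_buildStep_eq (facts : List (Int × Int)) :
    ∀ D : List Int, facts.foldl buildStep D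
      = (divsB facts).flatMap (fun dv => D.map (fun d => d * dv)) := by
  induction facts with
  | nil => intro D; simp [divsB]
  | cons pc rest ih =>
    intro D
    obtain ⟨p, c⟩ := pc
    rw [List.foldl_cons, ih]
    simp only [divsB, buildStep, List.flatMap_assoc, List.map_flatMap, List.flatMap_map,
      List.map_map]
    congr 1
    funext dv
    congr 1
    funext a
    congr 1
    funext d
    simp [Function.comp, mul_assoc]

-- the scan from 2 reaches exactly the stopping point p
theorem spfScan_eq (n p d : Int) :
    2 ≤ d → d ≤ p → (∀ q, d ≤ q → q < p → (q ^ 2 ≤ n ∧ ¬ q ∣ n)) →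
    ¬ (2 ≤ p ∧ p ^ 2 ≤ n ∧ PySem.Int.mod n p ≠ 0) → spfScan n d = p := by
  fun_induction spfScan n d with
  | case1 d h ih =>
    intro hd hdp hmid hstop
    have hdnep : d ≠ p := by rintro rfl; exact hstop h
    exact ih (by omega) (by omega) (fun q hq1 hq2 => hmid q (by omega) hq2) hstop
  | case2 d h =>
    intro hd hdp hmid hstop
    by_contra hne
    have hdp' : d < p := lt_of_le_of_ne hdp hne
    obtain ⟨hsq, hndvd⟩ := hmid d le_rfl hdp'
    have hm : PySem.Int.mod n d ≠ 0 :=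
      fun hm => hndvd ((PySem.Int.mod_eq_zero_iff_dvd n d).mp hm)
    exact h ⟨hd, hsq, hm⟩

-- when no candidate below p divides n and p² > n, the scan overshoots √n
theorem spfScan_sq_gt (n p : Int) (hp2 : 2 ≤ p) (hp : ¬ p ^ 2 ≤ n)
    (hinv : ∀ q, 2 ≤ q → q < p → ¬ q ∣ n) : ¬ (spfScan n 2) ^ 2 ≤ n := by
  intro hle
  have hr2 : 2 ≤ spfScan n 2 := spfScan_ge n 2
  have hmod : PySem.Int.mod n (spfScan n 2) = 0 := spfScan_mod n 2 (le_refl 2) hle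
  have hdvd : spfScan n 2 ∣ n := (PySem.Int.mod_eq_zero_iff_dvd n (spfScan n 2)).mp hmod
  have hrp : spfScan n 2 < p := by nlinarith
  exact hinv (spfScan n 2) hr2 hrp hdvd

-- main invariant: A's candidate walk produces exactly B's recursive factor list
theorem loopB_eq_altFacts (n p : Int) (fs : List (Int × Int)) :
    0 < n → (p = 2 ∨ (3 ≤ p ∧ ¬ (2:Int) ∣ p)) → (∀ q, 2 ≤ q → q < p → ¬ q ∣ n) →
    loopB n p fs = fs ++ altFacts n := by
  fun_induction loopB n p fs with
  | case1 n p fs hc ih =>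
    intro hn hsh hinv
    have hp2 : 2 ≤ p := by rcases hsh with h | h <;> omega
    have hsh' : (p + if 2 < p then 2 else 1) = 2 ∨
        (3 ≤ (p + if 2 < p then 2 else 1) ∧ ¬ (2:Int) ∣ (p + if 2 < p then 2 else 1)) := by
      rcases hsh with h | h
      · subst h; right; norm_num
      · right
        rw [if_pos (by omega : 2 < p)]
        exact ⟨by omega, by omega⟩
    by_cases hm : PySem.Int.mod n p = 0
    · have hcpos : 0 < (innerA p n).1 := innerA_fst_pos p n hp2 hn hm
      have hdvd' : (innerA p n).2 ∣ n := innerA_dvd p n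
      have hpos' : 0 < (innerA p n).2 := innerA_pos p n hn
      have hnotp : ¬ p ∣ (innerA p n).2 := innerA_not_dvd p n hp2 hn
      have hscan : spfScan n 2 = p := by
        apply spfScan_eq n p 2 (le_refl 2) hp2
        · intro q hq1 hq2
          exact ⟨by nlinarith, hinv q hq1 hq2⟩
        · intro hcon; exact hcon.2.2 hm
      have haf : altFacts n = (p, (innerA p n).1) :: altFacts (innerA p n).2 := by
        conv_lhs => rw [altFacts.eq_def]
        rw [hscan, stripAlt_eq_innerA, dif_pos hc]
      have hinv' : ∀ q, 2 ≤ q → q < (p + if 2 < p then 2 else 1) → ¬ q ∣ (innerA p n).2 := by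
        intro q hq1 hq2 hqd
        by_cases hqp : q < p
        · exact hinv q hq1 hqp (dvd_trans hqd hdvd')
        · by_cases hqep : q = p
          · exact hnotp (hqep ▸ hqd)
          · -- only possible when p > 2, q = p + 1, which is even while n' is odd
            have hple : 2 < p := by
              by_contra hple
              have : p = 2 := by omega
              subst this
              simp only [if_neg (by omega : ¬ (2:Int) < 2)] at hq2
              omega
            rw [if_pos hple] at hq2
            have hq : q = p + 1 := by omega
            have h2p : ¬ (2:Int) ∣ p := by
              rcases hsh with h | h
              · omega
              · exact h.2
            have h2q : (2:Int) ∣ q := by omega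
            have h2n : (2:Int) ∣ n := dvd_trans (dvd_trans h2q hqd) hdvd'
            exact hinv 2 (le_refl 2) (by omega) h2n
      simp only [dite_eq_ite] at ih
      rw [if_pos hcpos] at ih
      rw [if_pos hcpos, ih hpos' hsh' hinv', haf]
      simp
    · have hczero : ¬ 0 < (innerA p n).1 := by
        have : innerA p n = (0, n) := by
          rw [innerA.eq_def, dif_neg]
          intro hcon; exact hm hcon.2.2
        rw [this]
        omega
      have hinner : innerA p n = (0, n) := by
        rw [innerA.eq_def, dif_neg]
        intro hcon; exact hm hcon.2.2
      have hpn : ¬ p ∣ n := fun hd => hm ((PySem.Int.mod_eq_zero_iff_dvd n p).mpr hd)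
      have hinv' : ∀ q, 2 ≤ q → q < (p + if 2 < p then 2 else 1) → ¬ q ∣ n := by
        intro q hq1 hq2 hqd
        by_cases hqp : q < p
        · exact hinv q hq1 hqp hqd
        · by_cases hqep : q = p
          · exact hpn (hqep ▸ hqd)
          · have hple : 2 < p := by
              by_contra hple
              have : p = 2 := by omega
              subst this
              simp only [if_neg (by omega : ¬ (2:Int) < 2)] at hq2
              omega
            rw [if_pos hple] at hq2
            have hq : q = p + 1 := by omega
            have h2q : (2:Int) ∣ q := by omega
            have h2n : (2:Int) ∣ n := dvd_trans h2q hqd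
            exact hinv 2 (le_refl 2) (by omega) h2n
      simp only [dite_eq_ite] at ih
      rw [if_neg hczero] at ih
      rw [if_neg hczero, hinner]
      rw [hinner] at ih
      exact ih hn hsh' hinv'
  | case2 n p fs hc hn1 =>
    intro hn hsh hinv
    have hp2 : 2 ≤ p := by rcases hsh with h | h <;> omega
    have haf : altFacts n = [(n, 1)] := by
      rw [altFacts.eq_def, dif_neg (spfScan_sq_gt n p hp2 hc hinv), if_pos hn1]
    rw [haf]
  | case3 n p fs hc hn1 =>
    intro hn hsh hinv
    have hp2 : 2 ≤ p := by rcases hsh with h | h <;> omega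
    have haf : altFacts n = [] := by
      rw [altFacts.eq_def, dif_neg (spfScan_sq_gt n p hp2 hc hinv), if_neg hn1]
    rw [haf]
    simp

-- ===== VERDICT (by name: the statement is the Claim_ definition above) =====
theorem getPrimesAndDivs_spec : Claim_equal_getPrimesAndDivs := by
  intro n _
  show getPrimesAndDivs n = getPrimesAndDivs_alt n
  rw [getPrimesAndDivs, loopA_eq, alt_eq]
  by_cases hn : 0 < n
  · rw [loopB_eq_altFacts n 2 [] hn (Or.inl rfl) (by intro q h1 h2; omega)]
    rw [foldl_buildStep_eq]
    simp
  · have h4 : ¬ ((2:Int) ^ 2 ≤ n) := by omega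
    have hsc : spfScan n 2 = 2 := by
      rw [spfScan.eq_def, dif_neg]
      intro hcon; exact h4 hcon.2.1
    have hlb : loopB n 2 [] = [] := by
      rw [loopB.eq_def, dif_neg h4, if_neg (by omega)]
    have haf : altFacts n = [] := by
      rw [altFacts.eq_def, hsc, dif_neg h4, if_neg (by omega)]
    rw [hlb, haf]
    simp [divsB]
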